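-- pv_equiv track=rewrite | github.com/Sadeeptha-B/Advanced-Algorithms | Assignment 1/q2/q2.py | bc_matrix_wc
-- ===== SOURCE A (Python) =====
-- ALPHABET_SIZE = 26
--
-- WILDCARD_DIFF = 46 - 97
--
-- def bc_matrix_wc(pat):
--     mat = [None] * ALPHABET_SIZE # O(26)
--
--     #O(26m)
--     for pat_i in range(len(pat)-1, -1, -1):
--         ind = ord(pat[pat_i]) - 97
--
--         if ind == WILDCARD_DIFF:
--             for i in range(len(mat)):
--                 fill_bc_row(mat, pat, i, pat_i)
--             continue
--
--         fill_bc_row(mat, pat, ind, pat_i)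
--
--     return mat
--
-- def fill_bc_row(mat, pat, mat_i, pat_i):
--     if mat[mat_i] is None:
--         mat[mat_i] = [-1]* len(pat)
--
--     for j in range(pat_i, len(pat)):
--         if mat[mat_i][j] == - 1:
--             mat[mat_i][j] = pat_i
--         else:
--             break
-- ===== SOURCE B (Python) =====
-- ALPHABET_SIZE = 26
--
-- WILDCARD_DIFF = 46 - 97
--
-- def bc_matrix_wc(pat):
--     # Single left-to-right pass maintaining the rightmost occurrence per row.
--     m = len(pat)
--     last = [-1] * ALPHABET_SIZE
--     mat = [None] * ALPHABET_SIZE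
--     for j in range(m):
--         ind = ord(pat[j]) - 97
--         if ind == WILDCARD_DIFF:
--             for i in range(ALPHABET_SIZE):
--                 last[i] = j
--                 if mat[i] is None:
--                     mat[i] = [-1] * m
--         else:
--             last[ind] = j
--             if mat[ind] is None:
--                 mat[ind] = [-1] * m
--         for i in range(ALPHABET_SIZE):
--             if mat[i] is not None:
--                 mat[i][j] = last[i]
--     return mat
-- ===== Notes on version B (the rewrite author's own statement) =====
-- stated objective: alternative
-- what changed: B replaces A's right-to-left traversal with per-row fill-until-break loops by a single left-to-right column pass that maintains the rightmost occurrence seen so far per row and writes one cell per allocated row per column.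
import Mathlib
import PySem

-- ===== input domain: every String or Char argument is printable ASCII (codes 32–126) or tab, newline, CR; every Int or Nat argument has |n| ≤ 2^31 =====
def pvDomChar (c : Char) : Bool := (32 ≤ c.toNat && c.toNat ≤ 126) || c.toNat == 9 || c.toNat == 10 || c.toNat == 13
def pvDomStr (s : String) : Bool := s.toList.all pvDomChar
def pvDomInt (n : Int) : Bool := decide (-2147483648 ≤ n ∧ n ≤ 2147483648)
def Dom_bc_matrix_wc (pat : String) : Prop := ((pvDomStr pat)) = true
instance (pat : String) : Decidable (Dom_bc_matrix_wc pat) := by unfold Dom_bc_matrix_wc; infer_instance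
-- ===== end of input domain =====

-- B builds the same bad-character matrix in one left-to-right pass keeping the rightmost
-- occurrence per row, instead of A's right-to-left pass with fill-until-break row loops.

-- ===== PORT A =====
-- inner loop of fill_bc_row: 'for j in range(pat_i, len(pat)): if mat[mat_i][j] == -1: … else: break'
def fillRowLoop (m : Nat) (patI : Int) : Nat → List Int → List Int
  | j, row =>
    if _h : j < m then
      if PySem.List.pyGetD row (j : Int) 0 = -1 then
        fillRowLoop m patI (j + 1) (PySem.List.pySetD row (j : Int) patI)
      else row
    else row
  termination_by j _ => m - j

def fill_bc_row (mat : List (Option (List Int))) (m : Nat) (matI : Int) (patI : Int) :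
    List (Option (List Int)) :=
  let row0 := match PySem.List.pyGetD mat matI none with
    | none => List.replicate m (-1 : Int)
    | some r => r
  PySem.List.pySetD mat matI (some (fillRowLoop m patI patI.toNat row0))

def bc_matrix_wc (pat : String) : List (Option (List Int)) :=
  let l := pat.toList
  let m := l.length
  (PySem.List.pyRange ((m : Int) - 1) (-1) (-1)).foldl (fun mat patI =>
    let ind : Int := ((PySem.List.pyGetD l patI ' ').toNat : Int) - 97
    if ind = -51 then
      (List.range mat.length).foldl (fun mat (i : Nat) => fill_bc_row mat m (i : Int) patI) mat
    else
      fill_bc_row mat m ind patI) (List.replicate 26 none)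

-- ===== PORT B =====
def bc_matrix_wc_alt (pat : String) : List (Option (List Int)) :=
  let l := pat.toList
  let m := l.length
  let st := (List.range m).foldl
    (fun (st : List Int × List (Option (List Int))) (j : Nat) =>
      let ind : Int := ((PySem.List.pyGetD l (j : Int) ' ').toNat : Int) - 97
      let st :=
        if ind = -51 then
          (List.range 26).foldl
            (fun (st : List Int × List (Option (List Int))) (i : Nat) =>
              (PySem.List.pySetD st.1 (i : Int) (j : Int),
               if PySem.List.pyGetD st.2 (i : Int) none = none then
                 PySem.List.pySetD st.2 (i : Int) (some (List.replicate m (-1)))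
               else st.2)) st
        else
          (PySem.List.pySetD st.1 ind (j : Int),
           if PySem.List.pyGetD st.2 ind none = none then
             PySem.List.pySetD st.2 ind (some (List.replicate m (-1)))
           else st.2)
      let mat := (List.range 26).foldl
        (fun mat (i : Nat) =>
          match PySem.List.pyGetD mat (i : Int) none with
          | none => mat
          | some row =>
              PySem.List.pySetD mat (i : Int)
                (some (PySem.List.pySetD row (j : Int) (PySem.List.pyGetD st.1 (i : Int) 0))))
        st.2
      (st.1, mat))
    (List.replicate 26 (-1 : Int), List.replicate 26 none)
  st.2

-- ===== PRECONDITION & SPEC =====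
-- Pre_ excludes exactly the inputs on which A raises IndexError: a character other than the
-- wildcard '.' whose code is below 71 ('G') or above 122 ('z') yields a row index outside
-- [-26, 25] for the 26-row matrix.  (Codes 71–96 wrap around like Python negative indices;
-- A returns there and B matches.)
def preChar (c : Char) : Bool :=
  c == '.' || (decide (71 ≤ c.toNat) && decide (c.toNat ≤ 122))

def Pre_bc_matrix_wc (pat : String) : Prop := (pat.toList.all preChar) = true
instance (pat : String) : Decidable (Pre_bc_matrix_wc pat) := by
  unfold Pre_bc_matrix_wc; infer_instance

def pvWitness_bc_matrix_wc : String := "aG.zb"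

def Spec_bc_matrix_wc (pat : String) (out : List (Option (List Int))) : Prop :=
  out = bc_matrix_wc_alt pat
instance (pat : String) (out : List (Option (List Int))) : Decidable (Spec_bc_matrix_wc pat out) := by
  unfold Spec_bc_matrix_wc; infer_instance

-- ===== CLAIM (what is proved, stated in full; the proofs are below) =====
def Claim_equal_bc_matrix_wc : Prop :=
  ∀ (pat : String), Dom_bc_matrix_wc pat → Pre_bc_matrix_wc pat →
    Spec_bc_matrix_wc pat (bc_matrix_wc pat)

-- ===== LEMMAS AND PROOFS =====

theorem pre_char_iff (pat : String) (h : Pre_bc_matrix_wc pat) :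
    ∀ c ∈ pat.toList, c = '.' ∨ (71 ≤ c.toNat ∧ c.toNat ≤ 122) := by
  unfold Pre_bc_matrix_wc preChar at h
  simpa using h

-- row q "touches" row i of the matrix (wildcard touches every row)
def touchRow (l : List Char) (q i : Nat) : Bool :=
  match l[q]? with
  | some c => c = '.' || (c.toNat - 71) % 26 == i
  | none => false

-- rightmost q with k ≤ q < e touching row i, else -1
def lastBelow (l : List Char) (i k e : Nat) : Int :=
  (List.range e).foldl (fun acc q => if k ≤ q ∧ touchRow l q i = true then (q : Int) else acc) (-1)

def touchedFrom (l : List Char) (e i : Nat) : Bool :=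
  (List.range l.length).any (fun q => decide (e ≤ q) && touchRow l q i)

def touchedBelow (l : List Char) (e i : Nat) : Bool :=
  (List.range e).any (fun q => touchRow l q i)

-- A's matrix row i after processing positions e, e+1, …, m-1
def entryFrom (l : List Char) (e i : Nat) : Option (List Int) :=
  if touchedFrom l e i then
    some ((List.range l.length).map (fun p => lastBelow l i e (p + 1)))
  else none

def matFrom (l : List Char) (e : Nat) : List (Option (List Int)) :=
  (List.range 26).map (entryFrom l e)

-- B's state after processing columns 0, …, e-1
def entryBelow (l : List Char) (e i : Nat) : Option (List Int) :=
  if touchedBelow l e i then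
    some ((List.range l.length).map (fun p => if p < e then lastBelow l i 0 (p + 1) else -1))
  else none

def lastListB (l : List Char) (e : Nat) : List Int :=
  (List.range 26).map (fun i => lastBelow l i 0 e)

def matBelow (l : List Char) (e : Nat) : List (Option (List Int)) :=
  (List.range 26).map (entryBelow l e)

def PreL (l : List Char) : Prop := ∀ c ∈ l, c = '.' ∨ (71 ≤ c.toNat ∧ c.toNat ≤ 122)

-- ---- generic list lemmas ----

theorem getD_map_range' {α : Type} (f : Nat → α) (n i : Nat) (h : i < n) (d : α) :
    ((List.range n).map f).getD i d = f i := by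
  rw [List.getD_eq_getElem?_getD]
  simp [h]
theorem set_map_range {α : Type} (f : Nat → α) (n a : Nat) (v : α) (ha : a < n) :
    ((List.range n).map f).set a v = (List.range n).map (fun i => if i = a then v else f i) := by
  apply List.ext_getElem
  · simp
  · intro i h1 h2
    simp only [List.getElem_set, List.getElem_map, List.getElem_range]
    simp at h1
    by_cases hia : i = a <;> simp [hia]
    exact fun h => absurd h.symm hia
theorem map_range_congr {α : Type} (f g : Nat → α) (n : Nat) (h : ∀ i, i < n → f i = g i) :
    (List.range n).map f = (List.range n).map g := by
  apply List.map_congr_left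
  intro i hi
  exact h i (List.mem_range.mp hi)
theorem set_self_of_getD {α : Type} (xs : List α) (i : Nat) (v d : α)
    (h : xs.getD i d = v) (hv : ∀ (hi : i < xs.length), xs[i] = v) :
    xs.set i v = xs := by
  by_cases hi : i < xs.length
  · rw [← hv hi]; exact List.set_getElem_self ..
  · exact List.set_eq_of_length_le (by omega)
theorem foldl_set_range'_aux {α : Type} (g : Nat → α → α) (d0 : α) (n : Nat) :
    ∀ (b a : Nat) (f : Nat → α), a + b ≤ n →
    (List.range' a b).foldl (fun xs i => xs.set i (g i (xs.getD i d0))) ((List.range n).map f)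
      = (List.range n).map (fun i => if a ≤ i ∧ i < a + b then g i (f i) else f i) := by
  intro b
  induction b with
  | zero =>
    intro a f _
    simp only [List.range'_zero, List.foldl_nil]
    apply map_range_congr
    intro i _
    have : ¬(a ≤ i ∧ i < a + 0) := by omega
    simp [this]
  | succ b ih =>
    intro a f hab
    have ha : a < n := by omega
    rw [List.range'_succ, List.foldl_cons, getD_map_range' f n a ha,
      set_map_range f n a _ ha, ih (a + 1) _ (by omega)]
    apply map_range_congr
    intro i hi
    by_cases h1 : i = a
    · have hc1 : ¬(a + 1 ≤ i ∧ i < a + 1 + b) := by omega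
      have hc2 : a ≤ i ∧ i < a + (b + 1) := by omega
      simp [h1, hc1, hc2]
    · by_cases h2 : a + 1 ≤ i ∧ i < a + 1 + b
      · have h3 : a ≤ i ∧ i < a + (b + 1) := by omega
        simp [h1, h2, h3]
      · have h3 : ¬(a ≤ i ∧ i < a + (b + 1)) := by omega
        simp [h1, h2, h3]
        intro hx hy
        exact absurd ⟨by omega, hy⟩ h2
theorem foldl_set_range_map {α : Type} (g : Nat → α → α) (d0 : α) (n : Nat) (f : Nat → α) :
    (List.range n).foldl (fun xs i => xs.set i (g i (xs.getD i d0))) ((List.range n).map f)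
      = (List.range n).map (fun i => g i (f i)) := by
  have h := foldl_set_range'_aux g d0 n n 0 f (by omega)
  rw [← List.range_eq_range'] at h
  rw [h]
  apply map_range_congr
  intro i hi
  have : 0 ≤ i ∧ i < 0 + n := by omega
  simp [this]
  intro hn
  exact absurd hn (by omega)
theorem foldl_prod_split {α β ι : Type} (f : α → ι → α) (g : β → ι → β) (ks : List ι)
    (a : α) (b : β) :
    ks.foldl (fun p i => (f p.1 i, g p.2 i)) (a, b) = (ks.foldl f a, ks.foldl g b) := by
  induction ks generalizing a b with
  | nil => rfl
  | cons k ks ih => simpa using ih (f a k) (g b k)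
-- ---- negative-index resolution on a 26-element list ----

theorem pyGetD_neg26 {α : Type} (xs : List α) (d : α) (ind : Int) (h : xs.length = 26)
    (h1 : -26 ≤ ind) (h2 : ind < 0) :
    PySem.List.pyGetD xs ind d = xs.getD (ind + 26).toNat d := by
  have hni : ¬ (0 ≤ ind) := by omega
  have hr : -(26:Int) ≤ ind := by omega
  have : (26 : Nat) - (-ind).toNat = (ind + 26).toNat := by omega
  simp only [PySem.List.pyGetD, PySem.List.pyGet?, PySem.List.pyIdx?, h, hni, if_false]
  rw [if_pos (by push_cast; omega)]
  simp [this, List.getD_eq_getElem?_getD]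
theorem pySetD_neg26 {α : Type} (xs : List α) (v : α) (ind : Int) (h : xs.length = 26)
    (h1 : -26 ≤ ind) (h2 : ind < 0) :
    PySem.List.pySetD xs ind v = xs.set (ind + 26).toNat v := by
  have hni : ¬ (0 ≤ ind) := by omega
  have : (26 : Nat) - (-ind).toNat = (ind + 26).toNat := by omega
  simp only [PySem.List.pySetD, PySem.List.pySet?, PySem.List.pyIdx?, h, hni, if_false]
  rw [if_pos (by push_cast; omega)]
  simp [this]
-- ---- lastBelow ----

theorem lastBelow_succ (l : List Char) (i k e : Nat) :
    lastBelow l i k (e + 1)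
      = if k ≤ e ∧ touchRow l e i = true then (e : Int) else lastBelow l i k e := by
  unfold lastBelow
  rw [List.range_succ, List.foldl_append]
  rfl
theorem lastBelow_eq_neg_one_iff (l : List Char) (i k e : Nat) :
    lastBelow l i k e = -1 ↔ ∀ q, k ≤ q → q < e → touchRow l q i = false := by
  induction e with
  | zero => simp [lastBelow]
  | succ e ih =>
    rw [lastBelow_succ]
    by_cases h : k ≤ e ∧ touchRow l e i = true
    · rw [if_pos h]
      constructor
      · intro hc
        exact fun q hk hq => absurd hc (by omega)
      · intro hall
        have := hall e h.1 (by omega)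
        rw [h.2] at this; cases this
    · simp only [h, if_false, ih]
      constructor
      · intro hall q hk hq
        by_cases hqe : q = e
        · subst hqe
          rcases Bool.eq_false_or_eq_true (touchRow l q i) with h0 | h0
          · exact absurd ⟨hk, h0⟩ h
          · exact h0
        · exact hall q hk (by omega)
      · intro hall q hk hq
        exact hall q hk (by omega)
theorem lastBelow_of_le (l : List Char) (i k e : Nat) (h : e ≤ k) :
    lastBelow l i k e = -1 := by
  rw [lastBelow_eq_neg_one_iff]
  intro q hk hq
  omega
theorem lastBelow_shift_of_exists (l : List Char) (i k e : Nat)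
    (h : ∃ q, k + 1 ≤ q ∧ q < e ∧ touchRow l q i = true) :
    lastBelow l i k e = lastBelow l i (k + 1) e := by
  induction e with
  | zero => rcases h with ⟨q, _, hq, _⟩; omega
  | succ e ih =>
    rcases h with ⟨q, hq1, hq2, hq3⟩
    rw [lastBelow_succ, lastBelow_succ]
    by_cases he : touchRow l e i = true
    · by_cases hke : k + 1 ≤ e
      · simp [he, hke, show k ≤ e by omega]
      · have hqe : q = e ∨ q < e := by omega
        rcases hqe with rfl | hlt
        · omega
        · have hke' : ¬ k ≤ e := by omega
          simp [he, hke, hke']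
          exact ih ⟨q, hq1, hlt, hq3⟩
    · have hqe : q ≠ e := fun hh => by rw [hh] at hq3; exact he hq3
      simp [he]
      exact ih ⟨q, hq1, by omega, hq3⟩
theorem lastBelow_eq_k (l : List Char) (i k e : Nat) (ht : touchRow l k i = true)
    (hke : k < e) (hno : ∀ q, k + 1 ≤ q → q < e → touchRow l q i = false) :
    lastBelow l i k e = (k : Int) := by
  induction e with
  | zero => omega
  | succ e ih =>
    rw [lastBelow_succ]
    by_cases hek : e = k
    · subst hek; simp [ht]
    · have h1 : touchRow l e i = false := hno e (by omega) (by omega)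
      simp [h1]
      exact ih (by omega) (fun q hq1 hq2 => hno q hq1 (by omega))
theorem lastBelow_shift_of_not (l : List Char) (i k e : Nat) (h : touchRow l k i = false) :
    lastBelow l i k e = lastBelow l i (k + 1) e := by
  induction e with
  | zero => rfl
  | succ e ih =>
    rw [lastBelow_succ, lastBelow_succ, ih]
    by_cases hek : e = k
    · subst hek; simp [h]
    · by_cases hke : k ≤ e
      · have h2 : k + 1 ≤ e := by omega
        simp [hke, h2]
      · have h2 : ¬ (k + 1 ≤ e) := by omega
        simp [hke, h2]
-- ---- touched ----

theorem touchedFrom_false_iff (l : List Char) (e i : Nat) :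
    touchedFrom l e i = false ↔ ∀ q, e ≤ q → q < l.length → touchRow l q i = false := by
  unfold touchedFrom
  simp only [List.any_eq_false, List.mem_range, Bool.and_eq_true, decide_eq_true_eq, not_and]
  constructor
  · intro h q h1 h2
    cases h3 : touchRow l q i
    · rfl
    · exact absurd h3 (h q h2 h1)
  · intro h q hq h1
    simp [h q h1 hq]
theorem touchedFrom_true_of (l : List Char) (e k i : Nat) (hk : k < l.length)
    (h : touchRow l k i = true) (hek : e ≤ k) : touchedFrom l e i = true := by
  unfold touchedFrom
  rw [List.any_eq_true]
  exact ⟨k, by simpa using hk, by simp [hek, h]⟩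
theorem touchedFrom_shift (l : List Char) (k i : Nat) (h : touchRow l k i = false) :
    touchedFrom l k i = touchedFrom l (k + 1) i := by
  rcases Bool.eq_false_or_eq_true (touchedFrom l (k+1) i) with h1 | h1
  · rw [h1]
    unfold touchedFrom at h1 ⊢
    rw [List.any_eq_true] at h1 ⊢
    rcases h1 with ⟨q, hq1, hq2⟩
    refine ⟨q, hq1, ?_⟩
    simp only [Bool.and_eq_true, decide_eq_true_eq] at hq2 ⊢
    exact ⟨by omega, hq2.2⟩
  · rw [h1, touchedFrom_false_iff]
    rw [touchedFrom_false_iff] at h1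
    intro q hq1 hq2
    by_cases hqk : q = k
    · subst hqk; exact h
    · exact h1 q (by omega) hq2
theorem touchedBelow_succ (l : List Char) (e i : Nat) :
    touchedBelow l (e + 1) i = (touchedBelow l e i || touchRow l e i) := by
  unfold touchedBelow
  rw [List.range_succ]
  simp
theorem touchedBelow_false_iff (l : List Char) (e i : Nat) :
    touchedBelow l e i = false ↔ ∀ q, q < e → touchRow l q i = false := by
  unfold touchedBelow
  simp only [List.any_eq_false, List.mem_range]
  constructor
  · intro h q hq
    cases h3 : touchRow l q i
    · rfl
    · exact absurd h3 (by simpa using h q hq)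
  · intro h q hq; simp [h q hq]
theorem touchedBelow_len_eq (l : List Char) (i : Nat) :
    touchedBelow l l.length i = touchedFrom l 0 i := by
  unfold touchedBelow touchedFrom
  congr 1
-- ---- the fill loop of A ----

theorem fillRowLoop_spec (l : List Char) (i k : Nat) (hk : k < l.length)
    (ht : touchRow l k i = true) :
    ∀ t j, l.length - j ≤ t → k ≤ j →
      (∀ q, k + 1 ≤ q → q < j → touchRow l q i = false) →
      fillRowLoop l.length (k : Int) j
        ((List.range l.length).map (fun p =>
          if k ≤ p ∧ p < j then (k : Int) else lastBelow l i (k + 1) (p + 1)))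
        = (List.range l.length).map (fun p => lastBelow l i k (p + 1)) := by
  intro t
  induction t with
  | zero =>
    intro j h0 hkj hno
    have hjm : ¬ j < l.length := by omega
    rw [fillRowLoop, dif_neg hjm]
    apply map_range_congr
    intro p hp
    by_cases hkp : k ≤ p
    · rw [if_pos ⟨hkp, by omega⟩]
      exact (lastBelow_eq_k l i k (p + 1) ht (by omega)
        (fun q h1 h2 => hno q h1 (by omega))).symm
    · rw [if_neg (by omega)]
      rw [lastBelow_of_le l i (k + 1) (p + 1) (by omega),
        lastBelow_of_le l i k (p + 1) (by omega)]
  | succ t ih =>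
    intro j h0 hkj hno
    by_cases hjm : j < l.length
    · rw [fillRowLoop, dif_pos hjm]
      have hjj : ¬ (k ≤ j ∧ j < j) := by omega
      have hget : PySem.List.pyGetD ((List.range l.length).map (fun p =>
          if k ≤ p ∧ p < j then (k : Int) else lastBelow l i (k + 1) (p + 1))) (j : Int) 0
          = lastBelow l i (k + 1) (j + 1) := by
        rw [PySem.List.pyGetD_natCast, getD_map_range' _ _ _ hjm, if_neg hjj]
      rw [hget]
      by_cases hfj : lastBelow l i (k + 1) (j + 1) = -1
      · rw [if_pos hfj, PySem.List.pySetD_natCast, set_map_range _ _ _ _ hjm]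
        have hrw : (List.range l.length).map (fun p =>
            if p = j then (k : Int) else if k ≤ p ∧ p < j then (k : Int)
            else lastBelow l i (k + 1) (p + 1))
            = (List.range l.length).map (fun p =>
            if k ≤ p ∧ p < j + 1 then (k : Int) else lastBelow l i (k + 1) (p + 1)) := by
          apply map_range_congr
          intro p hp
          by_cases hpj : p = j
          · rw [if_pos hpj, if_pos (by omega)]
          · rw [if_neg hpj]
            by_cases hc : k ≤ p ∧ p < j
            · rw [if_pos hc, if_pos (by omega)]
            · rw [if_neg hc, if_neg (by omega)]
        rw [hrw]
        have hno' : ∀ q, k + 1 ≤ q → q < j + 1 → touchRow l q i = false := by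
          intro q h1 h2
          by_cases hq : q < j
          · exact hno q h1 hq
          · exact (lastBelow_eq_neg_one_iff l i (k + 1) (j + 1)).mp hfj q h1 h2
        exact ih (j + 1) (by omega) (by omega) hno'
      · rw [if_neg hfj]
        have hex : ∃ q, k + 1 ≤ q ∧ q < j + 1 ∧ touchRow l q i = true := by
          by_contra hcon
          push Not at hcon
          apply hfj
          rw [lastBelow_eq_neg_one_iff]
          intro q h1 h2
          cases h3 : touchRow l q i
          · rfl
          · exact absurd h3 (by simpa using hcon q h1 h2)
        apply map_range_congr
        intro p hp
        by_cases hkp : k ≤ p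
        · by_cases hpj : p < j
          · rw [if_pos ⟨hkp, hpj⟩]
            exact (lastBelow_eq_k l i k (p + 1) ht (by omega)
              (fun q h1 h2 => hno q h1 (by omega))).symm
          · rw [if_neg (by omega)]
            rcases hex with ⟨q, hq1, hq2, hq3⟩
            exact (lastBelow_shift_of_exists l i k (p + 1) ⟨q, hq1, by omega, hq3⟩).symm
        · rw [if_neg (by omega)]
          rw [lastBelow_of_le l i (k + 1) (p + 1) (by omega),
            lastBelow_of_le l i k (p + 1) (by omega)]
    · rw [fillRowLoop, dif_neg hjm]
      apply map_range_congr
      intro p hp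
      by_cases hkp : k ≤ p
      · rw [if_pos ⟨hkp, by omega⟩]
        exact (lastBelow_eq_k l i k (p + 1) ht (by omega)
          (fun q h1 h2 => hno q h1 (by omega))).symm
      · rw [if_neg (by omega)]
        rw [lastBelow_of_le l i (k + 1) (p + 1) (by omega),
          lastBelow_of_le l i k (p + 1) (by omega)]
theorem entry_step_touch (l : List Char) (k i : Nat) (hk : k < l.length)
    (ht : touchRow l k i = true) :
    some (fillRowLoop l.length (k : Int) k
      (match entryFrom l (k + 1) i with
       | none => List.replicate l.length (-1 : Int)
       | some r => r)) = entryFrom l k i := by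
  unfold entryFrom
  rw [if_pos (touchedFrom_true_of l k k i hk ht (le_refl k))]
  have hinv : ∀ rows, rows = (List.range l.length).map (fun p => lastBelow l i (k + 1) (p + 1)) →
      some (fillRowLoop l.length (k : Int) k rows)
        = some ((List.range l.length).map (fun p => lastBelow l i k (p + 1))) := by
    intro rows hr
    subst hr
    congr 1
    have hbase : (List.range l.length).map (fun p => lastBelow l i (k + 1) (p + 1))
        = (List.range l.length).map (fun p =>
            if k ≤ p ∧ p < k then (k : Int) else lastBelow l i (k + 1) (p + 1)) := by
      apply map_range_congr
      intro p _
      rw [if_neg (by omega)]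
    rw [hbase]
    exact fillRowLoop_spec l i k hk ht (l.length - k) k (by omega) (le_refl k)
      (fun q h1 h2 => by omega)
  by_cases htf : touchedFrom l (k + 1) i = true
  · rw [if_pos htf]
    exact hinv _ rfl
  · rw [if_neg htf]
    apply hinv
    have hall := (touchedFrom_false_iff l (k + 1) i).mp (Bool.eq_false_iff.mpr htf)
    have : (List.replicate l.length (-1 : Int)) = (List.range l.length).map (fun _ => (-1 : Int)) := by
      apply List.ext_getElem
      · simp
      · intro p h1 h2; simp
    rw [this]
    apply map_range_congr
    intro p hp
    exact ((lastBelow_eq_neg_one_iff l i (k + 1) (p + 1)).mpr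
      (fun q h1 h2 => hall q h1 (by omega))).symm

theorem entry_step_notouch (l : List Char) (k i : Nat) (ht : touchRow l k i = false) :
    entryFrom l (k + 1) i = entryFrom l k i := by
  unfold entryFrom
  rw [touchedFrom_shift l k i ht]
  by_cases htf : touchedFrom l (k + 1) i = true
  · rw [if_pos htf, if_pos htf]
    congr 1
    apply map_range_congr
    intro p _
    exact (lastBelow_shift_of_not l i k (p + 1) ht).symm
  · rw [if_neg htf, if_neg htf]

-- ---- character facts under PreL ----

theorem char_wildcard (l : List Char) (k : Nat) (hk : k < l.length) (hc : l[k] = '.') :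
    ∀ i, i < 26 → touchRow l k i = true := by
  intro i _
  unfold touchRow
  rw [List.getElem?_eq_getElem hk, hc]
  simp

theorem char_row (l : List Char) (k : Nat) (hk : k < l.length) (hc : l[k] ≠ '.')
    (h1 : 71 ≤ l[k].toNat) (h2 : l[k].toNat ≤ 122) :
    ∀ i, touchRow l k i = true ↔ i = (l[k].toNat - 71) % 26 := by
  intro i
  unfold touchRow
  rw [List.getElem?_eq_getElem hk]
  simp only [Bool.or_eq_true, decide_eq_true_eq, beq_iff_eq]
  constructor
  · intro h
    rcases h with h | h
    · exact absurd h hc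
    · omega
  · intro h
    right
    omega

theorem fill_bc_row_set (mat : List (Option (List Int))) (m r : Nat) (patI : Int) :
    fill_bc_row mat m (r : Int) patI
      = mat.set r (some (fillRowLoop m patI patI.toNat
          (match mat.getD r none with
           | none => List.replicate m (-1)
           | some rr => rr))) := by
  unfold fill_bc_row
  rw [PySem.List.pyGetD_natCast, PySem.List.pySetD_natCast]

theorem fill_bc_row_neg (mat : List (Option (List Int))) (m : Nat) (ind patI : Int)
    (h26 : mat.length = 26) (h1 : -26 ≤ ind) (h2 : ind < 0) :
    fill_bc_row mat m ind patI
      = mat.set (ind + 26).toNat (some (fillRowLoop m patI patI.toNat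
          (match mat.getD (ind + 26).toNat none with
           | none => List.replicate m (-1)
           | some rr => rr))) := by
  unfold fill_bc_row
  rw [pyGetD_neg26 mat none ind h26 h1 h2, pySetD_neg26 mat _ ind h26 h1 h2]

theorem matFrom_length (l : List Char) (e : Nat) : (matFrom l e).length = 26 := by
  simp [matFrom]

theorem matFrom_getD (l : List Char) (e i : Nat) (hi : i < 26) :
    (matFrom l e).getD i none = entryFrom l e i := by
  unfold matFrom
  exact getD_map_range' _ _ _ hi _

-- ---- step lemmas ----

theorem stepA (l : List Char) (hPre : PreL l) (k : Nat) (hk : k < l.length) :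
    (fun mat (patI : Int) =>
      let ind : Int := ((PySem.List.pyGetD l patI ' ').toNat : Int) - 97
      if ind = -51 then
        (List.range mat.length).foldl (fun mat (i : Nat) => fill_bc_row mat l.length (i : Int) patI) mat
      else
        fill_bc_row mat l.length ind patI) (matFrom l (k + 1)) (k : Int) = matFrom l k := by
  have hgetc : PySem.List.pyGetD l (k : Int) ' ' = l[k] := by
    rw [PySem.List.pyGetD_natCast]
    exact List.getD_eq_getElem l ' ' hk
  have hc := hPre l[k] (List.getElem_mem hk)
  show (let ind : Int := ((PySem.List.pyGetD l (k : Int) ' ').toNat : Int) - 97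
    if ind = -51 then
      (List.range (matFrom l (k + 1)).length).foldl
        (fun mat (i : Nat) => fill_bc_row mat l.length (i : Int) (k : Int)) (matFrom l (k + 1))
    else fill_bc_row (matFrom l (k + 1)) l.length ind (k : Int)) = matFrom l k
  rw [hgetc]
  rcases hc with hdot | hbound
  · rw [hdot]
    rw [if_pos (by decide), matFrom_length]
    have hfn : (fun (mat : List (Option (List Int))) (i : Nat) =>
        fill_bc_row mat l.length (i : Int) (k : Int))
        = (fun (mat : List (Option (List Int))) (i : Nat) => mat.set i
            (some (fillRowLoop l.length (k : Int) k
              (match mat.getD i none with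
               | none => List.replicate l.length (-1)
               | some rr => rr)))) := by
      funext mat i
      rw [fill_bc_row_set]
      simp
    rw [hfn]
    unfold matFrom
    rw [foldl_set_range_map (fun i v => some (fillRowLoop l.length (k : Int) k
      (match v with
       | none => List.replicate l.length (-1)
       | some rr => rr))) none 26 (entryFrom l (k + 1))]
    apply map_range_congr
    intro i hi
    exact entry_step_touch l k i hk (char_wildcard l k hk hdot i hi)
  · have hne : l[k] ≠ '.' := by
      intro h
      rw [h] at hbound
      simp at hbound
    have hindne : ¬ (((l[k].toNat : Int) - 97) = -51) := by omega
    rw [if_neg hindne]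
    have hr26 : (l[k].toNat - 71) % 26 < 26 := Nat.mod_lt _ (by omega)
    have hred : fill_bc_row (matFrom l (k + 1)) l.length ((l[k].toNat : Int) - 97) (k : Int)
        = (matFrom l (k + 1)).set ((l[k].toNat - 71) % 26)
            (some (fillRowLoop l.length (k : Int) k
              (match entryFrom l (k + 1) ((l[k].toNat - 71) % 26) with
               | none => List.replicate l.length (-1)
               | some rr => rr))) := by
      by_cases hpos : (0 : Int) ≤ (l[k].toNat : Int) - 97
      · have h1 : ((l[k].toNat : Int) - 97) = ((l[k].toNat - 97 : Nat) : Int) := by omega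
        have h2 : (l[k].toNat - 97 : Nat) = (l[k].toNat - 71) % 26 := by omega
        rw [h1, fill_bc_row_set, h2, matFrom_getD _ _ _ hr26]
        simp
      · have h3 : ((((l[k].toNat : Int) - 97) + 26)).toNat = (l[k].toNat - 71) % 26 := by omega
        rw [fill_bc_row_neg _ _ _ _ (matFrom_length l (k + 1)) (by omega) (by omega), h3,
          matFrom_getD _ _ _ hr26]
        simp
    rw [hred]
    unfold matFrom
    rw [set_map_range _ _ _ _ hr26]
    apply map_range_congr
    intro i hi
    by_cases hir : i = (l[k].toNat - 71) % 26
    · rw [if_pos hir, hir]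
      exact entry_step_touch l k _ hk
        ((char_row l k hk hne hbound.1 hbound.2 _).mpr rfl)
    · rw [if_neg hir]
      apply entry_step_notouch
      cases h3 : touchRow l k i
      · rfl
      · exact absurd ((char_row l k hk hne hbound.1 hbound.2 i).mp h3) hir

def allocEntry (l : List Char) (j i : Nat) : Option (List Int) :=
  if touchRow l j i = true then some ((entryBelow l j i).getD (List.replicate l.length (-1)))
  else entryBelow l j i

theorem replicate_eq_map_range {α : Type} (n : Nat) (c : α) :
    List.replicate n c = (List.range n).map (fun _ => c) := by
  apply List.ext_getElem
  · simp
  · intro p h1 h2; simp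

theorem matBelow_getD (l : List Char) (e i : Nat) (hi : i < 26) :
    (matBelow l e).getD i none = entryBelow l e i := by
  unfold matBelow
  exact getD_map_range' _ _ _ hi _

theorem lastListB_getD (l : List Char) (e i : Nat) (hi : i < 26) :
    (lastListB l e).getD i 0 = lastBelow l i 0 e := by
  unfold lastListB
  exact getD_map_range' _ _ _ hi _

theorem lastBelow_succ_touch (l : List Char) (i j : Nat) (ht : touchRow l j i = true) :
    lastBelow l i 0 (j + 1) = (j : Int) := by
  rw [lastBelow_succ, if_pos ⟨Nat.zero_le j, ht⟩]

theorem lastBelow_succ_notouch (l : List Char) (i j : Nat) (ht : touchRow l j i = false) :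
    lastBelow l i 0 (j + 1) = lastBelow l i 0 j := by
  rw [lastBelow_succ, if_neg (fun hc => by rw [ht] at hc; exact Bool.false_ne_true hc.2)]

theorem allocFun_eq (l : List Char) :
    (fun (mat : List (Option (List Int))) (i : Nat) =>
      if PySem.List.pyGetD mat (i : Int) none = none then
        PySem.List.pySetD mat (i : Int) (some (List.replicate l.length (-1)))
      else mat)
    = (fun (mat : List (Option (List Int))) (i : Nat) =>
        mat.set i (some ((mat.getD i none).getD (List.replicate l.length (-1))))) := by
  funext mat i
  rw [PySem.List.pyGetD_natCast]
  cases hv : mat.getD i none with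
  | none =>
    rw [if_pos rfl, PySem.List.pySetD_natCast]
    rfl
  | some r =>
    rw [if_neg (by simp)]
    simp only [Option.getD_some]
    refine (set_self_of_getD mat i (some r) none hv ?_).symm
    intro hi
    rw [List.getD_eq_getElem mat none hi] at hv
    exact hv

theorem writeFun_eq (l : List Char) (j : Nat) (last : List Int) :
    (fun (mat : List (Option (List Int))) (i : Nat) =>
      match PySem.List.pyGetD mat (i : Int) none with
      | none => mat
      | some row =>
          PySem.List.pySetD mat (i : Int)
            (some (PySem.List.pySetD row (j : Int) (PySem.List.pyGetD last (i : Int) 0))))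
    = (fun (mat : List (Option (List Int))) (i : Nat) =>
        mat.set i ((mat.getD i none).map
          (fun row => row.set j (last.getD i 0)))) := by
  funext mat i
  rw [PySem.List.pyGetD_natCast]
  cases hv : mat.getD i none with
  | none =>
    show mat = mat.set i none
    refine (set_self_of_getD mat i none none hv ?_).symm
    intro hi
    rw [List.getD_eq_getElem mat none hi] at hv
    exact hv
  | some r =>
    show PySem.List.pySetD mat (i : Int)
        (some (PySem.List.pySetD r (j : Int) (PySem.List.pyGetD last (i : Int) 0)))
      = mat.set i (some (r.set j (last.getD i 0)))
    simp only [PySem.List.pySetD_natCast, PySem.List.pyGetD_natCast]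

theorem alloc_write (l : List Char) (j i : Nat) (hj : j < l.length) :
    ((allocEntry l j i).map (fun row => row.set j (lastBelow l i 0 (j + 1))))
      = entryBelow l (j + 1) i := by
  unfold allocEntry entryBelow
  cases ht : touchRow l j i with
  | true =>
    rw [if_pos rfl]
    have htb : touchedBelow l (j + 1) i = true := by
      rw [touchedBelow_succ, ht, Bool.or_true]
    rw [if_pos htb]
    simp only [Option.map_some]
    congr 1
    have hw : lastBelow l i 0 (j + 1) = (j : Int) := lastBelow_succ_touch l i j ht
    cases htb0 : touchedBelow l j i with
    | true =>
      rw [if_pos rfl]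
      simp only [Option.getD_some]
      rw [set_map_range _ _ _ _ hj]
      apply map_range_congr
      intro p hp
      by_cases hpj : p = j
      · rw [if_pos hpj, hpj, if_pos (by omega), hw]
      · rw [if_neg hpj]
        by_cases hplt : p < j
        · rw [if_pos hplt, if_pos (by omega)]
        · rw [if_neg hplt, if_neg (by omega)]
    | false =>
      rw [if_neg (by simp)]
      simp only [Option.getD_none]
      rw [replicate_eq_map_range, set_map_range _ _ _ _ hj]
      apply map_range_congr
      intro p hp
      have hnone := (touchedBelow_false_iff l j i).mp htb0
      by_cases hpj : p = j
      · rw [if_pos hpj, hpj, if_pos (by omega), hw]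
      · rw [if_neg hpj]
        by_cases hplt : p < j + 1
        · rw [if_pos hplt]
          exact ((lastBelow_eq_neg_one_iff l i 0 (p + 1)).mpr
            (fun q h1 h2 => hnone q (by omega))).symm
        · rw [if_neg hplt]
  | false =>
    rw [if_neg (by simp), touchedBelow_succ, ht, Bool.or_false]
    have hw : lastBelow l i 0 (j + 1) = lastBelow l i 0 j := lastBelow_succ_notouch l i j ht
    cases htb0 : touchedBelow l j i with
    | false => simp
    | true =>
      rw [if_pos rfl, if_pos rfl]
      simp only [Option.map_some]
      congr 1
      rw [set_map_range _ _ _ _ hj]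
      apply map_range_congr
      intro p hp
      by_cases hpj : p = j
      · rw [if_pos hpj, hpj, if_pos (by omega)]
      · rw [if_neg hpj]
        by_cases hplt : p < j
        · rw [if_pos hplt, if_pos (by omega)]
        · rw [if_neg hplt, if_neg (by omega)]

theorem fold_last (l : List Char) (j : Nat) :
    (List.range 26).foldl
      (fun (last : List Int) (i : Nat) => PySem.List.pySetD last (i : Int) (j : Int))
      (lastListB l j)
    = (List.range 26).map (fun _ => (j : Int)) := by
  have hfn : (fun (last : List Int) (i : Nat) => PySem.List.pySetD last (i : Int) (j : Int))
      = (fun (xs : List Int) (i : Nat) =>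
          xs.set i ((fun (_ : Nat) (_ : Int) => (j : Int)) i (xs.getD i 0))) := by
    funext xs i
    rw [PySem.List.pySetD_natCast]
  rw [hfn]
  unfold lastListB
  exact foldl_set_range_map (fun (_ : Nat) (_ : Int) => (j : Int)) 0 26 _

theorem fold_alloc (l : List Char) (j : Nat) :
    (List.range 26).foldl
      (fun (mat : List (Option (List Int))) (i : Nat) =>
        if PySem.List.pyGetD mat (i : Int) none = none then
          PySem.List.pySetD mat (i : Int) (some (List.replicate l.length (-1)))
        else mat)
      (matBelow l j)
    = (List.range 26).map
        (fun i => some ((entryBelow l j i).getD (List.replicate l.length (-1)))) := by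
  rw [allocFun_eq l]
  unfold matBelow
  exact foldl_set_range_map
    (fun (_ : Nat) (v : Option (List Int)) => some (v.getD (List.replicate l.length (-1))))
    none 26 _

theorem fold_write (l : List Char) (j : Nat) (last : List Int) (F : Nat → Option (List Int)) :
    (List.range 26).foldl
      (fun (mat : List (Option (List Int))) (i : Nat) =>
        match PySem.List.pyGetD mat (i : Int) none with
        | none => mat
        | some row =>
            PySem.List.pySetD mat (i : Int)
              (some (PySem.List.pySetD row (j : Int) (PySem.List.pyGetD last (i : Int) 0))))
      ((List.range 26).map F)
    = (List.range 26).map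
        (fun i => (F i).map (fun row => row.set j (last.getD i 0))) := by
  rw [writeFun_eq l j last]
  rw [foldl_set_range_map
    (fun (i : Nat) (v : Option (List Int)) => v.map (fun row => row.set j (last.getD i 0)))
    none 26 F]

theorem phase2_done (l : List Char) (j : Nat) (hj : j < l.length) :
    (List.range 26).foldl
      (fun (mat : List (Option (List Int))) (i : Nat) =>
        match PySem.List.pyGetD mat (i : Int) none with
        | none => mat
        | some row =>
            PySem.List.pySetD mat (i : Int)
              (some (PySem.List.pySetD row (j : Int)
                (PySem.List.pyGetD (lastListB l (j + 1)) (i : Int) 0))))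
      ((List.range 26).map (allocEntry l j))
    = matBelow l (j + 1) := by
  rw [fold_write l j (lastListB l (j + 1)) (allocEntry l j)]
  unfold matBelow
  apply map_range_congr
  intro i hi
  rw [lastListB_getD l (j + 1) i hi]
  exact alloc_write l j i hj

theorem stepB (l : List Char) (hPre : PreL l) (j : Nat) (hj : j < l.length) :
    (fun (st : List Int × List (Option (List Int))) (j : Nat) =>
      let ind : Int := ((PySem.List.pyGetD l (j : Int) ' ').toNat : Int) - 97
      let st :=
        if ind = -51 then
          (List.range 26).foldl
            (fun (st : List Int × List (Option (List Int))) (i : Nat) =>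
              (PySem.List.pySetD st.1 (i : Int) (j : Int),
               if PySem.List.pyGetD st.2 (i : Int) none = none then
                 PySem.List.pySetD st.2 (i : Int) (some (List.replicate l.length (-1)))
               else st.2)) st
        else
          (PySem.List.pySetD st.1 ind (j : Int),
           if PySem.List.pyGetD st.2 ind none = none then
             PySem.List.pySetD st.2 ind (some (List.replicate l.length (-1)))
           else st.2)
      let mat := (List.range 26).foldl
        (fun mat (i : Nat) =>
          match PySem.List.pyGetD mat (i : Int) none with
          | none => mat
          | some row =>
              PySem.List.pySetD mat (i : Int)
                (some (PySem.List.pySetD row (j : Int) (PySem.List.pyGetD st.1 (i : Int) 0))))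
        st.2
      (st.1, mat)) (lastListB l j, matBelow l j) j = (lastListB l (j + 1), matBelow l (j + 1)) := by
  have hgetc : PySem.List.pyGetD l (j : Int) ' ' = l[j] := by
    rw [PySem.List.pyGetD_natCast]
    exact List.getD_eq_getElem l ' ' hj
  have hc := hPre l[j] (List.getElem_mem hj)
  show (let st :=
      if ((PySem.List.pyGetD l (j : Int) ' ').toNat : Int) - 97 = -51 then
        (List.range 26).foldl
          (fun (st : List Int × List (Option (List Int))) (i : Nat) =>
            (PySem.List.pySetD st.1 (i : Int) (j : Int),
             if PySem.List.pyGetD st.2 (i : Int) none = none then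
               PySem.List.pySetD st.2 (i : Int) (some (List.replicate l.length (-1)))
             else st.2)) (lastListB l j, matBelow l j)
      else
        (PySem.List.pySetD (lastListB l j) (((PySem.List.pyGetD l (j : Int) ' ').toNat : Int) - 97) (j : Int),
         if PySem.List.pyGetD (matBelow l j) (((PySem.List.pyGetD l (j : Int) ' ').toNat : Int) - 97) none = none then
           PySem.List.pySetD (matBelow l j) (((PySem.List.pyGetD l (j : Int) ' ').toNat : Int) - 97) (some (List.replicate l.length (-1)))
         else matBelow l j)
    let mat := (List.range 26).foldl
      (fun mat (i : Nat) =>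
        match PySem.List.pyGetD mat (i : Int) none with
        | none => mat
        | some row =>
            PySem.List.pySetD mat (i : Int)
              (some (PySem.List.pySetD row (j : Int) (PySem.List.pyGetD st.1 (i : Int) 0))))
      st.2
    (st.1, mat)) = (lastListB l (j + 1), matBelow l (j + 1))
  rw [hgetc]
  have hlast_pair : ∀ (st : List Int × List (Option (List Int))),
      st = (lastListB l (j + 1), (List.range 26).map (allocEntry l j)) →
      (let mat := (List.range 26).foldl
        (fun mat (i : Nat) =>
          match PySem.List.pyGetD mat (i : Int) none with
          | none => mat
          | some row =>
              PySem.List.pySetD mat (i : Int)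
                (some (PySem.List.pySetD row (j : Int) (PySem.List.pyGetD st.1 (i : Int) 0))))
        st.2
      (st.1, mat)) = (lastListB l (j + 1), matBelow l (j + 1)) := by
    intro st hst
    subst hst
    show (lastListB l (j + 1), _) = _
    rw [phase2_done l j hj]
  rcases hc with hdot | hbound
  · rw [hdot]
    rw [if_pos (by decide)]
    apply hlast_pair
    rw [foldl_prod_split
      (fun (last : List Int) (i : Nat) => PySem.List.pySetD last (i : Int) (j : Int))
      (fun (mat : List (Option (List Int))) (i : Nat) =>
        if PySem.List.pyGetD mat (i : Int) none = none then
          PySem.List.pySetD mat (i : Int) (some (List.replicate l.length (-1)))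
        else mat)
      (List.range 26) (lastListB l j) (matBelow l j)]
    rw [fold_last l j, fold_alloc l j]
    have h1 : (List.range 26).map (fun _ => (j : Int)) = lastListB l (j + 1) := by
      unfold lastListB
      apply map_range_congr
      intro i hi
      exact (lastBelow_succ_touch l i j (char_wildcard l j hj hdot i hi)).symm
    have h2 : (List.range 26).map
        (fun i => some ((entryBelow l j i).getD (List.replicate l.length (-1))))
        = (List.range 26).map (allocEntry l j) := by
      apply map_range_congr
      intro i hi
      unfold allocEntry
      rw [if_pos (char_wildcard l j hj hdot i hi)]
    rw [h1, h2]
  · have hne : l[j] ≠ '.' := by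
      intro h
      rw [h] at hbound
      simp at hbound
    have hindne : ¬ (((l[j].toNat : Int) - 97) = -51) := by omega
    rw [if_neg hindne]
    apply hlast_pair
    have hr26 : (l[j].toNat - 71) % 26 < 26 := Nat.mod_lt _ (by omega)
    have hsetlast : PySem.List.pySetD (lastListB l j) ((l[j].toNat : Int) - 97) (j : Int)
        = (lastListB l j).set ((l[j].toNat - 71) % 26) (j : Int) := by
      by_cases hpos : (0 : Int) ≤ (l[j].toNat : Int) - 97
      · have h1 : ((l[j].toNat : Int) - 97) = ((l[j].toNat - 97 : Nat) : Int) := by omega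
        have h2 : (l[j].toNat - 97 : Nat) = (l[j].toNat - 71) % 26 := by omega
        rw [h1, PySem.List.pySetD_natCast, h2]
      · have h3 : ((((l[j].toNat : Int) - 97) + 26)).toNat = (l[j].toNat - 71) % 26 := by omega
        rw [pySetD_neg26 _ _ _ (by simp [lastListB]) (by omega) (by omega), h3]
    have hgetmat : PySem.List.pyGetD (matBelow l j) ((l[j].toNat : Int) - 97) none
        = entryBelow l j ((l[j].toNat - 71) % 26) := by
      have hlen : (matBelow l j).length = 26 := by simp [matBelow]
      by_cases hpos : (0 : Int) ≤ (l[j].toNat : Int) - 97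
      · have h1 : ((l[j].toNat : Int) - 97) = ((l[j].toNat - 97 : Nat) : Int) := by omega
        have h2 : (l[j].toNat - 97 : Nat) = (l[j].toNat - 71) % 26 := by omega
        rw [h1, PySem.List.pyGetD_natCast, h2, matBelow_getD _ _ _ hr26]
      · have h3 : ((((l[j].toNat : Int) - 97) + 26)).toNat = (l[j].toNat - 71) % 26 := by omega
        rw [pyGetD_neg26 _ _ _ hlen (by omega) (by omega), h3, matBelow_getD _ _ _ hr26]
    have hsetmat : PySem.List.pySetD (matBelow l j) ((l[j].toNat : Int) - 97)
        (some (List.replicate l.length (-1)))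
        = (matBelow l j).set ((l[j].toNat - 71) % 26) (some (List.replicate l.length (-1))) := by
      by_cases hpos : (0 : Int) ≤ (l[j].toNat : Int) - 97
      · have h1 : ((l[j].toNat : Int) - 97) = ((l[j].toNat - 97 : Nat) : Int) := by omega
        have h2 : (l[j].toNat - 97 : Nat) = (l[j].toNat - 71) % 26 := by omega
        rw [h1, PySem.List.pySetD_natCast, h2]
      · have h3 : ((((l[j].toNat : Int) - 97) + 26)).toNat = (l[j].toNat - 71) % 26 := by omega
        rw [pySetD_neg26 _ _ _ (by simp [matBelow]) (by omega) (by omega), h3]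
    have htr : touchRow l j ((l[j].toNat - 71) % 26) = true :=
      (char_row l j hj hne hbound.1 hbound.2 _).mpr rfl
    have hto : ∀ i, i ≠ (l[j].toNat - 71) % 26 → touchRow l j i = false := by
      intro i hir
      cases h3 : touchRow l j i
      · rfl
      · exact absurd ((char_row l j hj hne hbound.1 hbound.2 i).mp h3) hir
    have hl1 : PySem.List.pySetD (lastListB l j) ((l[j].toNat : Int) - 97) (j : Int)
        = lastListB l (j + 1) := by
      rw [hsetlast]
      unfold lastListB
      rw [set_map_range _ _ _ _ hr26]
      apply map_range_congr
      intro i hi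
      by_cases hir : i = (l[j].toNat - 71) % 26
      · rw [if_pos hir, hir]
        exact (lastBelow_succ_touch l _ j htr).symm
      · rw [if_neg hir]
        exact (lastBelow_succ_notouch l i j (hto i hir)).symm
    have hm1 : (if PySem.List.pyGetD (matBelow l j) ((l[j].toNat : Int) - 97) none = none then
        PySem.List.pySetD (matBelow l j) ((l[j].toNat : Int) - 97)
          (some (List.replicate l.length (-1)))
        else matBelow l j) = (List.range 26).map (allocEntry l j) := by
      rw [hgetmat]
      by_cases hent : entryBelow l j ((l[j].toNat - 71) % 26) = none
      · rw [if_pos hent, hsetmat]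
        unfold matBelow
        rw [set_map_range _ _ _ _ hr26]
        apply map_range_congr
        intro i hi
        unfold allocEntry
        by_cases hir : i = (l[j].toNat - 71) % 26
        · rw [if_pos hir, hir, if_pos htr, hent]
          rfl
        · rw [if_neg hir, if_neg (by simp [hto i hir])]
      · rw [if_neg hent]
        unfold matBelow
        apply map_range_congr
        intro i hi
        unfold allocEntry
        by_cases hir : i = (l[j].toNat - 71) % 26
        · rw [hir, if_pos htr]
          cases hE : entryBelow l j ((l[j].toNat - 71) % 26) with
          | none => exact absurd hE hent
          | some R => rfl
        · rw [if_neg (by simp [hto i hir])]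
    rw [hl1, hm1]

-- ---- assembling the two loops ----

theorem matFrom_len_init (l : List Char) :
    (List.replicate 26 (none : Option (List Int))) = matFrom l l.length := by
  rw [replicate_eq_map_range]
  unfold matFrom
  apply map_range_congr
  intro i _
  unfold entryFrom
  rw [if_neg]
  rw [Bool.not_eq_true, touchedFrom_false_iff l l.length i]
  intro q h1 h2
  omega

theorem foldl_init_congr {α β : Type} (f : α → β → α) (xs : List β) {a b : α} (h : a = b)
    (c : α) (h2 : xs.foldl f b = c) : xs.foldl f a = c := by
  rw [h]
  exact h2

theorem A_loop (l : List Char) (hPre : PreL l) :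
    ∀ k, k ≤ l.length →
    (PySem.List.pyRange ((k : Int) - 1) (-1) (-1)).foldl
      (fun mat patI =>
        let ind : Int := ((PySem.List.pyGetD l patI ' ').toNat : Int) - 97
        if ind = -51 then
          (List.range mat.length).foldl
            (fun mat (i : Nat) => fill_bc_row mat l.length (i : Int) patI) mat
        else fill_bc_row mat l.length ind patI)
      (matFrom l k) = matFrom l 0 := by
  intro k
  induction k with
  | zero =>
    intro _
    rw [show ((0 : Nat) : Int) - 1 = -1 by norm_num,
      PySem.List.pyRange_neg_one_eq_nil (le_refl (-1 : Int))]
    rfl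
  | succ k ih =>
    intro hk1
    have hk : k < l.length := by omega
    rw [show (((k + 1 : Nat)) : Int) - 1 = (k : Int) by push_cast; ring,
      PySem.List.pyRange_neg_one_cons (by omega : (-1 : Int) < (k : Int)),
      List.foldl_cons]
    exact foldl_init_congr _ _ (stepA l hPre k hk) _ (ih (by omega))

theorem B_loop (l : List Char) (hPre : PreL l) :
    ∀ t, t ≤ l.length →
    (List.range' (l.length - t) t).foldl
      (fun (st : List Int × List (Option (List Int))) (j : Nat) =>
        let ind : Int := ((PySem.List.pyGetD l (j : Int) ' ').toNat : Int) - 97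
        let st :=
          if ind = -51 then
            (List.range 26).foldl
              (fun (st : List Int × List (Option (List Int))) (i : Nat) =>
                (PySem.List.pySetD st.1 (i : Int) (j : Int),
                 if PySem.List.pyGetD st.2 (i : Int) none = none then
                   PySem.List.pySetD st.2 (i : Int) (some (List.replicate l.length (-1)))
                 else st.2)) st
          else
            (PySem.List.pySetD st.1 ind (j : Int),
             if PySem.List.pyGetD st.2 ind none = none then
               PySem.List.pySetD st.2 ind (some (List.replicate l.length (-1)))
             else st.2)
        let mat := (List.range 26).foldl
          (fun mat (i : Nat) =>
            match PySem.List.pyGetD mat (i : Int) none with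
            | none => mat
            | some row =>
                PySem.List.pySetD mat (i : Int)
                  (some (PySem.List.pySetD row (j : Int) (PySem.List.pyGetD st.1 (i : Int) 0))))
          st.2
        (st.1, mat))
      (lastListB l (l.length - t), matBelow l (l.length - t))
      = (lastListB l l.length, matBelow l l.length) := by
  intro t
  induction t with
  | zero =>
    intro _
    simp only [List.range'_zero, List.foldl_nil, Nat.sub_zero]
  | succ t ih =>
    intro ht1
    have ha : l.length - (t + 1) < l.length := by omega
    have ha1 : l.length - (t + 1) + 1 = l.length - t := by omega
    rw [List.range'_succ, List.foldl_cons]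
    refine foldl_init_congr _ _ (stepB l hPre (l.length - (t + 1)) ha) _ ?_
    rw [ha1]
    exact ih (by omega)


theorem A_eq_matFrom (pat : String) (hPre : PreL pat.toList) :
    bc_matrix_wc pat = matFrom pat.toList 0 := by
  show (PySem.List.pyRange ((pat.toList.length : Int) - 1) (-1) (-1)).foldl
      (fun mat patI =>
        let ind : Int := ((PySem.List.pyGetD pat.toList patI ' ').toNat : Int) - 97
        if ind = -51 then
          (List.range mat.length).foldl
            (fun mat (i : Nat) => fill_bc_row mat pat.toList.length (i : Int) patI) mat
        else fill_bc_row mat pat.toList.length ind patI)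
      (List.replicate 26 none) = matFrom pat.toList 0
  rw [matFrom_len_init pat.toList]
  exact A_loop pat.toList hPre pat.toList.length (le_refl _)

theorem B_eq_matBelow (pat : String) (hPre : PreL pat.toList) :
    bc_matrix_wc_alt pat = matBelow pat.toList pat.toList.length := by
  have hinit1 : List.replicate 26 (-1 : Int) = lastListB pat.toList 0 := by
    rw [replicate_eq_map_range]
    unfold lastListB
    apply map_range_congr
    intro i _
    rfl
  have hinit2 : List.replicate 26 (none : Option (List Int)) = matBelow pat.toList 0 := by
    rw [replicate_eq_map_range]
    unfold matBelow
    apply map_range_congr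
    intro i _
    rfl
  show ((List.range pat.toList.length).foldl
      (fun (st : List Int × List (Option (List Int))) (j : Nat) =>
        let ind : Int := ((PySem.List.pyGetD pat.toList (j : Int) ' ').toNat : Int) - 97
        let st :=
          if ind = -51 then
            (List.range 26).foldl
              (fun (st : List Int × List (Option (List Int))) (i : Nat) =>
                (PySem.List.pySetD st.1 (i : Int) (j : Int),
                 if PySem.List.pyGetD st.2 (i : Int) none = none then
                   PySem.List.pySetD st.2 (i : Int)
                     (some (List.replicate pat.toList.length (-1)))
                 else st.2)) st
          else
            (PySem.List.pySetD st.1 ind (j : Int),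
             if PySem.List.pyGetD st.2 ind none = none then
               PySem.List.pySetD st.2 ind (some (List.replicate pat.toList.length (-1)))
             else st.2)
        let mat := (List.range 26).foldl
          (fun mat (i : Nat) =>
            match PySem.List.pyGetD mat (i : Int) none with
            | none => mat
            | some row =>
                PySem.List.pySetD mat (i : Int)
                  (some (PySem.List.pySetD row (j : Int)
                    (PySem.List.pyGetD st.1 (i : Int) 0))))
          st.2
        (st.1, mat))
      (List.replicate 26 (-1 : Int), List.replicate 26 none)).2
    = matBelow pat.toList pat.toList.length
  rw [hinit1, hinit2]
  have h := B_loop pat.toList hPre pat.toList.length (le_refl _)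
  rw [Nat.sub_self, ← List.range_eq_range'] at h
  exact congrArg Prod.snd h

theorem matFrom_zero_eq (l : List Char) : matFrom l 0 = matBelow l l.length := by
  unfold matFrom matBelow
  apply map_range_congr
  intro i _
  unfold entryFrom entryBelow
  rw [touchedBelow_len_eq]
  by_cases ht : touchedFrom l 0 i = true
  · rw [if_pos ht, if_pos ht]
    congr 1
    apply map_range_congr
    intro p hp
    rw [if_pos (by omega)]
  · rw [if_neg ht, if_neg ht]

-- ===== VERDICT (by name: the statement is the Claim_ definition above) =====
theorem bc_matrix_wc_spec : Claim_equal_bc_matrix_wc := by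
  intro pat _hDom hPre
  have hP : PreL pat.toList := pre_char_iff pat hPre
  unfold Spec_bc_matrix_wc
  rw [A_eq_matFrom pat hP, B_eq_matBelow pat hP, matFrom_zero_eq]
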